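-- pv_equiv track=rewrite | github.com/charlesrambo/advances_in_financial_ML | Chapter_18.py | lempel_ziv_library
-- ===== SOURCE A (Python) =====
-- def lempel_ziv_library(message):
--
--     # Initialize counter at 1
--     i = 1
--
--     # Start by adding first and most simple sequence
--     library = [message[0]]
--
--     while i < len(message):
--
--         for j in range(i, len(message)):
--
--             # Get sequence
--             x = message[i:j + 1]
--
--             # If it isn't in the library...
--             if x not in library:
--
--                 # ... add it
--                 library.append(x)
--
--                 break
--
--         i = j + 1
--
--     return library
-- ===== SOURCE B (Python) =====
-- def lempel_ziv_library(message):
--     # Flat single scan with a phrase accumulator and a hash-set membership index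
--     library = [message[0]]
--     seen = {message[0]}
--     current = ""
--     for ch in message[1:]:
--         current = current + ch
--         if current not in seen:
--             library.append(current)
--             seen.add(current)
--             current = ""
--     return library
-- ===== Notes on version B (the rewrite author's own statement) =====
-- stated objective: faster
-- what changed: Replaced A's nested while/for (restarting an inner extend-and-break scan with slices and O(library) list membership at each test) by a single flat pass over the characters that grows the current phrase incrementally and tests membership in a hash set, appending and resetting on a miss.
import Mathlib
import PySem

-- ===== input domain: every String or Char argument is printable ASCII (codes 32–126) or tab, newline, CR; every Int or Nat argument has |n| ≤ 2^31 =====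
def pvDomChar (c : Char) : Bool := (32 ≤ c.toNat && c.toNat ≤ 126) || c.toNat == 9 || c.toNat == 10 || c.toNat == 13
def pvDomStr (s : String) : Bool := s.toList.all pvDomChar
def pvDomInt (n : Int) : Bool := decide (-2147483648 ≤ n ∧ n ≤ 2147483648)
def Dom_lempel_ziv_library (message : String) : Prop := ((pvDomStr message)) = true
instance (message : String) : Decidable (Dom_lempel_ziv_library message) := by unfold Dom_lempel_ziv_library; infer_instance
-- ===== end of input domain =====

-- B replaces A's nested while/for phrase restarts by one flat pass with an incremental
-- phrase accumulator and a set for the membership test.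

-- ===== PORT A =====
-- inner 'for j in range(i, len(message))': extend the slice until it is not in the library,
-- then break, returning the new library and the value j has at exit (len-1 on fall-through).
def lzAInner (msg : List Char) (start j : Nat) (lib : List (List Char)) :
    List (List Char) × Nat :=
  if _h : j < msg.length then
    let x := PySem.List.slice msg (some (start : Int)) (some ((j : Int) + 1))
    if x ∈ lib then lzAInner msg start (j + 1) lib
    else (lib ++ [x], j)
  else (lib, msg.length - 1)
termination_by msg.length - j

-- the inner loop's exit value of j is ≥ its entry value (used for the outer loop's termination)
theorem lzAInner_le_snd (msg : List Char) (start j : Nat) (lib : List (List Char))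
    (h : j < msg.length) : j ≤ (lzAInner msg start j lib).2 := by
  induction hm : msg.length - j using Nat.strong_induction_on generalizing j lib with
  | _ m ih =>
    rw [lzAInner]
    simp only [h, dif_pos]
    split
    · by_cases h' : j + 1 < msg.length
      · exact le_trans (Nat.le_succ j) (ih (msg.length - (j+1)) (by omega) _ _ h' rfl)
      · rw [lzAInner]; simp only [h', dif_neg, not_false_iff]; omega
    · exact le_refl j

-- outer 'while i < len(message)'
def lzAOuter (msg : List Char) (i : Nat) (lib : List (List Char)) : List (List Char) :=
  if h : i < msg.length then
    let r := lzAInner msg i i lib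
    lzAOuter msg (r.2 + 1) r.1
  else lib
termination_by msg.length - i
decreasing_by
  have := lzAInner_le_snd msg i i lib h
  omega

def lempel_ziv_library (message : String) : List String :=
  match message.toList with
  | [] => []   -- Python raises IndexError on message[0] here; excluded by Pre_
  | c :: _ => (lzAOuter message.toList 1 [[c]]).map String.ofList

-- ===== PORT B =====
-- one step of B's flat loop: grow the current phrase; on a set miss, append and reset
def lzBStep (st : List (List Char) × PySem.Set (List Char) × List Char) (ch : Char) :
    List (List Char) × PySem.Set (List Char) × List Char :=
  let cur := st.2.2 ++ [ch]
  if PySem.Set.contains st.2.1 cur then (st.1, st.2.1, cur)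
  else (st.1 ++ [cur], PySem.Set.add st.2.1 cur, [])

def lempel_ziv_library_alt (message : String) : List String :=
  match message.toList with
  | [] => []   -- Python raises IndexError on message[0] here; excluded by Pre_
  | c :: rest =>
    ((rest.foldl lzBStep ([[c]], PySem.Set.ofList [[c]], [])).1).map String.ofList

-- ===== PRECONDITION & SPEC =====
-- Pre_ excludes exactly the empty string, on which A (and B) raise IndexError at message[0].
def Pre_lempel_ziv_library (message : String) : Prop := message ≠ ""
instance (message : String) : Decidable (Pre_lempel_ziv_library message) := by
  unfold Pre_lempel_ziv_library; infer_instance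
def pvWitness_lempel_ziv_library : String := "abab"

def Spec_lempel_ziv_library (message : String) (out : List String) : Prop :=
  out = lempel_ziv_library_alt message
instance (message : String) (out : List String) : Decidable (Spec_lempel_ziv_library message out) := by
  unfold Spec_lempel_ziv_library; infer_instance

-- ===== CLAIM (what is proved, stated in full; the proofs are below) =====
def Claim_equal_lempel_ziv_library : Prop :=
  ∀ (message : String), Dom_lempel_ziv_library message →
    Pre_lempel_ziv_library message →
      Spec_lempel_ziv_library message (lempel_ziv_library message)

-- ===== LEMMAS AND PROOFS =====

-- common reference scan: current phrase is msg[start:k+1]; on a miss append and restart at k+1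
def lzScan (msg : List Char) (start k : Nat) (lib : List (List Char)) : List (List Char) :=
  if _h : k < msg.length then
    let x := (msg.drop start).take (k + 1 - start)
    if x ∈ lib then lzScan msg start (k + 1) lib
    else lzScan msg (k + 1) (k + 1) (lib ++ [x])
  else lib
termination_by msg.length - k

-- A's slice is the drop/take phrase
theorem lzA_slice_eq (msg : List Char) (start j : Nat) :
    PySem.List.slice msg (some (start : Int)) (some ((j : Int) + 1))
      = (msg.drop start).take (j + 1 - start) := by
  have : ((j : Int) + 1) = ((j + 1 : Nat) : Int) := by push_cast; ring
  rw [this, PySem.List.slice_natCast]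

-- A's inner loop followed by the outer loop equals the flat scan
theorem lzA_eq_scan (msg : List Char) (start j : Nat) (lib : List (List Char)) :
    lzAOuter msg ((lzAInner msg start j lib).2 + 1) (lzAInner msg start j lib).1
      = lzScan msg start j lib := by
  induction hm : msg.length - j using Nat.strong_induction_on generalizing start j lib with
  | _ m ih =>
    rw [lzAInner, lzScan]
    by_cases h : j < msg.length
    · simp only [h, dif_pos, lzA_slice_eq]
      split
      · exact ih (msg.length - (j + 1)) (by omega) start (j + 1) lib rfl
      · show lzAOuter msg (j + 1) _ = _
        rw [lzAOuter]
        by_cases h' : j + 1 < msg.length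
        · simp only [h', dif_pos]
          exact ih (msg.length - (j + 1)) (by omega) (j + 1) (j + 1) _ rfl
        · simp only [h', dif_neg, not_false_iff]
          rw [lzScan]; simp [h']
    · simp only [h, dif_neg, not_false_iff]
      rw [lzAOuter]
      have : ¬ (msg.length - 1 + 1 < msg.length) := by omega
      simp [this]

-- B's fold equals the flat scan, under the loop invariant
theorem lzB_inv (msg : List Char) (k start : Nat) (lib seen : List (List Char))
    (cur : List Char) (hsk : start ≤ k)
    (hcur : cur = (msg.drop start).take (k - start))
    (hseen : ∀ x, x ∈ seen ↔ x ∈ lib) :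
    (List.foldl lzBStep (lib, seen, cur) (msg.drop k)).1 = lzScan msg start k lib := by
  induction hm : msg.length - k using Nat.strong_induction_on generalizing k start lib seen cur with
  | _ m ih =>
    rw [lzScan]
    by_cases h : k < msg.length
    · simp only [h, dif_pos]
      have hdrop : msg.drop k = msg[k] :: msg.drop (k + 1) :=
        List.drop_eq_getElem_cons h
      have hlen : k - start < (msg.drop start).length := by
        simp [List.length_drop]; omega
      have hget : (msg.drop start)[k - start] = msg[k] := by
        rw [List.getElem_drop]; congr 1; omega
      have hcur' : cur ++ [msg[k]] = (msg.drop start).take (k + 1 - start) := by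
        have : k + 1 - start = (k - start) + 1 := by omega
        rw [hcur, this, ← hget, List.take_concat_get']
      rw [hdrop, List.foldl_cons]
      show (List.foldl lzBStep (lzBStep (lib, seen, cur) msg[k]) (msg.drop (k+1))).1 = _
      unfold lzBStep
      simp only [hcur']
      by_cases hmem : (msg.drop start).take (k + 1 - start) ∈ lib
      · have hc : PySem.Set.contains seen ((msg.drop start).take (k + 1 - start)) = true := by
          simpa [PySem.Set.contains_iff, hseen] using hmem
        simp only [hc, if_pos, hmem]
        exact ih (msg.length - (k + 1)) (by omega) (k + 1) start lib seen _
          (by omega) rfl hseen rfl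
      · have hc : PySem.Set.contains seen ((msg.drop start).take (k + 1 - start)) = false := by
          simpa [PySem.Set.contains_iff, hseen] using hmem
        have hadd : PySem.Set.add seen ((msg.drop start).take (k + 1 - start))
            = seen ++ [(msg.drop start).take (k + 1 - start)] := by
          have hns : (msg.drop start).take (k + 1 - start) ∉ seen :=
            fun hx => hmem ((hseen _).mp hx)
          simp [PySem.Set.add, hns]
        simp only [hc, if_neg, Bool.false_eq_true, not_false_iff, hmem, hadd]
        exact ih (msg.length - (k + 1)) (by omega) (k + 1) (k + 1) _ _ []
          (le_refl _) (by simp) (by intro x; simp [hseen]) rfl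
    · simp only [h, dif_neg, not_false_iff]
      have : msg.drop k = [] := List.drop_eq_nil_of_le (by omega)
      simp [this]

-- ===== VERDICT (by name: the statement is the Claim_ definition above) =====
theorem lempel_ziv_library_spec : Claim_equal_lempel_ziv_library := by
  intro message _hdom hpre
  unfold Spec_lempel_ziv_library lempel_ziv_library lempel_ziv_library_alt
  cases hm : message.toList with
  | nil =>
      exact absurd (String.toList_eq_nil_iff.mp hm) hpre
  | cons c rest =>
      show (lzAOuter (c :: rest) 1 [[c]]).map String.ofList
        = ((rest.foldl lzBStep ([[c]], PySem.Set.ofList [[c]], [])).1).map String.ofList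
      congr 1
      have hA : lzAOuter (c :: rest) 1 [[c]] = lzScan (c :: rest) 1 1 [[c]] := by
        rw [lzAOuter]
        split
        · exact lzA_eq_scan (c :: rest) 1 1 [[c]]
        · rename_i h1
          rw [lzScan]
          simp only [h1, dif_neg, not_false_iff]
      have hB : (rest.foldl lzBStep ([[c]], PySem.Set.ofList [[c]], [])).1
          = lzScan (c :: rest) 1 1 [[c]] := by
        have hofl : PySem.Set.ofList [[c]] = [[c]] := rfl
        have hdrop1 : (c :: rest).drop 1 = rest := rfl
        have := lzB_inv (c :: rest) 1 1 [[c]] (PySem.Set.ofList [[c]]) []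
          (le_refl 1) (by simp) (by intro x; rw [hofl])
        rw [hdrop1] at this
        exact this
      rw [hA, hB]
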